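-- pv_equiv track=rewrite | github.com/Arsen1302/Code-copy-detector | TestData/solutions/problem_909_1.py | solution_909_1
-- ===== SOURCE A (Python) =====
-- def solution_909_1(s: str) -> str:
--     s = list(s)
--     # Big S: O(n)
--     result = []
--
--     # Logic is capture distinct char with set
--     # Remove found char from initial string
--
--     # Big O: O(n)
--     while len(s) > 0:
--
--         # Big O: O(n log n) Space: O(n)
--         smallest = sorted(set(s))
--         # Big O: O(s) - reduced set
--         for small in smallest:
--             result.append(small)
--             s.remove(small)
--
--         # Big O: O(n log n) Space: O(n)
--         largest = sorted(set(s), reverse = True)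
--         # Big O: O(s) - reduced set
--         for large in largest:
--             result.append(large)
--             s.remove(large)
--
--     return ''.join(result)
-- ===== SOURCE B (Python) =====
-- def solution_909_1(s: str) -> str:
--     counts = {}
--     for ch in s:
--         counts[ch] = counts.get(ch, 0) + 1
--     pairs = [(c, counts[c]) for c in sorted(counts)]
--     out = []
--     while pairs:
--         out.extend(c for c, _ in pairs)
--         pairs = [(c, n - 1) for c, n in pairs if n > 1]
--         out.extend(c for c, _ in reversed(pairs))
--         pairs = [(c, n - 1) for c, n in pairs if n > 1]
--     return ''.join(out)
-- ===== Notes on version B (the rewrite author's own statement) =====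
-- stated objective: faster
-- what changed: B counts frequencies in one pass and sorts the distinct characters once, then emits rounds by decrementing a sorted (char,count) list, instead of A's re-sorting the remaining multiset and doing a linear list.remove per emitted character each round.
import Mathlib
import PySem

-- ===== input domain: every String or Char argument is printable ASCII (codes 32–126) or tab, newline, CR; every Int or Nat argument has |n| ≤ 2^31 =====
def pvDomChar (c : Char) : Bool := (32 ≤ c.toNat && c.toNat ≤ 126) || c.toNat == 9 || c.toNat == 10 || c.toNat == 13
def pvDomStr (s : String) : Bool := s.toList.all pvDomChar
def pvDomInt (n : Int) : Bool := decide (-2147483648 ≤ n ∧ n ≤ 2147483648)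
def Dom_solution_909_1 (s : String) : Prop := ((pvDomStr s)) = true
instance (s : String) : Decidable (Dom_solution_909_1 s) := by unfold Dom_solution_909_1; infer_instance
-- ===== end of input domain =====

-- B replaces A's per-round re-sort of the remaining multiset and per-character list.remove
-- by counting frequencies once, sorting the distinct characters once, and emitting rounds
-- from a decrementing sorted (char, count) list (objective: faster).

-- ===== PORT A =====
-- One 'for x in xs: result.append(x); s.remove(x)' pass of A over state (result, s).
-- Python's s.remove(x) is ported as List.erase: exact here because every x handed to the
-- pass is a member of s (PySem.List.remove?_eq_some_erase), so ValueError is never raised.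
def pvPassA (cs : List Char) (st : List Char × List Char) : List Char × List Char :=
  cs.foldl (fun p c => (p.1 ++ [c], p.2.erase c)) st

-- termination facts for pvLoopA (cited by its decreasing_by)
theorem pvPassA_eq (cs : List Char) : ∀ st : List Char × List Char,
    pvPassA cs st = (st.1 ++ cs, cs.foldl (fun u c => u.erase c) st.2) := by
  induction cs with
  | nil => intro st; simp [pvPassA]
  | cons c cs ih =>
      intro st
      have h := ih (st.1 ++ [c], st.2.erase c)
      simp [pvPassA, List.foldl_cons] at h ⊢
      simp [h]

theorem pvErase_len_le (cs : List Char) : ∀ t : List Char,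
    (cs.foldl (fun u c => u.erase c) t).length ≤ t.length := by
  induction cs with
  | nil => intro t; simp
  | cons c cs ih =>
      intro t
      calc ((c :: cs).foldl (fun u c => u.erase c) t).length
          ≤ (t.erase c).length := ih (t.erase c)
        _ ≤ t.length := List.length_erase_le

theorem pvPassA_snd_lt (s r : List Char) (hs : s ≠ []) :
    (pvPassA (PySem.List.sorted (PySem.Set.ofList s) (fun x => x)) (r, s)).2.length < s.length := by
  have hne : PySem.List.sorted (PySem.Set.ofList s) (fun x => x) ≠ [] := by
    intro h
    rw [PySem.List.sorted_eq_nil_iff] at h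
    obtain ⟨c, hc⟩ := List.exists_mem_of_ne_nil s hs
    have : c ∈ PySem.Set.ofList s := (PySem.Set.mem_ofList s c).mpr hc
    simp [h] at this
  obtain ⟨c, cs, hcons⟩ := List.exists_cons_of_ne_nil hne
  have hcmem : c ∈ s := by
    have : c ∈ PySem.List.sorted (PySem.Set.ofList s) (fun x => x) := by simp [hcons]
    rw [PySem.List.mem_sorted, PySem.Set.mem_ofList] at this
    exact this
  rw [pvPassA_eq, hcons]
  simp only [List.foldl_cons]
  calc (cs.foldl (fun u c => u.erase c) (s.erase c)).length
      ≤ (s.erase c).length := pvErase_len_le cs (s.erase c)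
    _ < s.length := by
        rw [List.length_erase_of_mem hcmem]
        have : 0 < s.length := List.length_pos_of_ne_nil hs
        omega

def pvLoopA (s : List Char) (result : List Char) : List Char :=
  if _h : s = [] then result
  else
    let p1 := pvPassA (PySem.List.sorted (PySem.Set.ofList s) (fun x => x)) (result, s)
    let p2 := pvPassA (PySem.List.sorted (PySem.Set.ofList p1.2) (fun x => x) true) p1
    pvLoopA p2.2 p2.1
termination_by s.length
decreasing_by
  have h2 := pvPassA_snd_lt s result _h
  have h3 : (pvPassA (PySem.List.sorted (PySem.Set.ofList (pvPassA (PySem.List.sorted (PySem.Set.ofList s) (fun x => x)) (result, s)).2) (fun x => x) true)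
      (pvPassA (PySem.List.sorted (PySem.Set.ofList s) (fun x => x)) (result, s))).2.length
      ≤ (pvPassA (PySem.List.sorted (PySem.Set.ofList s) (fun x => x)) (result, s)).2.length := by
    rw [pvPassA_eq]
    exact pvErase_len_le _ _
  omega

def solution_909_1 (s : String) : String := String.ofList (pvLoopA s.toList [])

-- ===== PORT B =====
-- One decrement round of B: [(c, n - 1) for (c, n) in ps if n > 1]
def pvDec (ps : List (Char × Int)) : List (Char × Int) :=
  (ps.filter (fun p => decide (1 < p.2))).map (fun p => (p.1, p.2 - 1))

def pvMu (ps : List (Char × Int)) : Nat := (ps.map (fun p => p.2.toNat)).sum + ps.length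

-- termination fact for pvLoopB (cited by its decreasing_by)
theorem pvDec_mu_le : ∀ ps : List (Char × Int), pvMu (pvDec ps) ≤ (ps.map (fun p => p.2.toNat)).sum := by
  intro ps
  induction ps with
  | nil => simp [pvDec, pvMu]
  | cons p t ih =>
      obtain ⟨c, n⟩ := p
      by_cases h : (1 : Int) < n
      · simp [pvDec, pvMu, h] at ih ⊢
        omega
      · simp [pvDec, pvMu, h] at ih ⊢
        omega

def pvLoopB (ps : List (Char × Int)) (out : List Char) : List Char :=
  if _h : ps = [] then out
  else
    let out1 := out ++ ps.map Prod.fst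
    let ps1 := pvDec ps
    let out2 := out1 ++ ps1.reverse.map Prod.fst
    pvLoopB (pvDec ps1) out2
termination_by pvMu ps
decreasing_by
  have h1 := pvDec_mu_le (pvDec ps)
  have h2 := pvDec_mu_le ps
  have h3 : 0 < ps.length := List.length_pos_of_ne_nil _h
  unfold pvMu at *
  omega

def solution_909_1_alt (s : String) : String :=
  let cs := s.toList
  let counts := cs.foldl (fun d c => d.insert c (d.getD c 0 + 1)) PySem.Dict.empty
  let pairs := (PySem.List.sorted counts.keys (fun x => x)).map (fun c => (c, counts.getD c 0))
  String.ofList (pvLoopB pairs [])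

-- ===== PRECONDITION & SPEC =====
def Spec_solution_909_1 (s : String) (out : String) : Prop := out = solution_909_1_alt s
instance (s : String) (out : String) : Decidable (Spec_solution_909_1 s out) := by unfold Spec_solution_909_1; infer_instance

-- ===== CLAIM (what is proved, stated in full; the proofs are below) =====
def Claim_equal_solution_909_1 : Prop := ∀ (s : String), Dom_solution_909_1 s → Spec_solution_909_1 s (solution_909_1 s)

-- ===== LEMMAS AND PROOFS =====

-- the sorted distinct characters of s, and B's abstract pair state for multiset s
def pvSP (s : List Char) : List Char := PySem.List.sorted (PySem.Set.ofList s) (fun x => x)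
def pvPS (s : List Char) : List (Char × Int) := (pvSP s).map (fun c => (c, (s.count c : Int)))
def pvE (t cs : List Char) : List Char := cs.foldl (fun u c => u.erase c) t

theorem pvSP_nodup (s : List Char) : (pvSP s).Nodup := by
  have h : (PySem.Set.ofList s).Perm (pvSP s) := (PySem.List.sorted_perm _ _ _).symm
  exact h.nodup (PySem.Set.nodup_ofList s)

theorem pvSP_mem (s : List Char) (c : Char) : c ∈ pvSP s ↔ c ∈ s := by
  unfold pvSP
  rw [PySem.List.mem_sorted, PySem.Set.mem_ofList]

theorem pvE_count (cs : List Char) : ∀ t c, (pvE t cs).count c = t.count c - cs.count c := by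
  induction cs with
  | nil => intro t c; simp [pvE]
  | cons a cs ih =>
      intro t c
      have h1 : pvE t (a :: cs) = pvE (t.erase a) cs := by simp [pvE]
      rw [h1, ih]
      have h2 : (t.erase a).count c = t.count c - (if a == c then 1 else 0) := List.count_erase
      rw [h2, List.count_cons]
      by_cases hca : c = a
      · subst hca; simp; omega
      · have e1 : (a == c) = false := by simp [Ne.symm hca]
        have e2 : (c == a) = false := by simp [hca]
        simp [e1]

-- after erasing one occurrence of each distinct char of t, every count drops by exactly one
theorem pvE_count_sub (t l : List Char) (hnd : l.Nodup) (hm : ∀ c, c ∈ l ↔ c ∈ t)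
    (c : Char) : (pvE t l).count c = t.count c - 1 := by
  rw [pvE_count]
  by_cases hc : c ∈ t
  · rw [List.count_eq_one_of_mem hnd ((hm c).mpr hc)]
  · have h1 : l.count c = 0 := List.count_eq_zero_of_not_mem (fun h => hc ((hm c).mp h))
    have h2 : t.count c = 0 := List.count_eq_zero_of_not_mem hc
    omega

theorem pvSP_E (t l : List Char) (hnd : l.Nodup) (hm : ∀ c, c ∈ l ↔ c ∈ t) :
    pvSP (pvE t l) = (pvSP t).filter (fun c => decide (2 ≤ t.count c)) := by
  apply PySem.List.sorted_eq_of_perm_of_pairwise_lt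
  · rw [List.perm_ext_iff_of_nodup ((pvSP_nodup t).filter _) (PySem.Set.nodup_ofList _)]
    intro c
    rw [List.mem_filter, PySem.Set.mem_ofList, pvSP_mem]
    constructor
    · rintro ⟨hct, h2⟩
      have := pvE_count_sub t l hnd hm c
      rw [← List.count_pos_iff]
      simp at h2
      omega
    · intro hc
      have hcount := pvE_count_sub t l hnd hm c
      have hpos : 0 < (pvE t l).count c := List.count_pos_iff.mpr hc
      exact ⟨List.count_pos_iff.mp (by omega), by simp; omega⟩
  · exact (PySem.List.sorted_ofList_pairwise_lt _).filter _

theorem pvPS_E (t l : List Char) (hnd : l.Nodup) (hm : ∀ c, c ∈ l ↔ c ∈ t) :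
    pvPS (pvE t l) = pvDec (pvPS t) := by
  unfold pvPS pvDec
  rw [pvSP_E t l hnd hm]
  rw [List.filter_map, List.map_map]
  have hfilter : ((pvSP t).filter ((fun p : Char × Int => decide (1 < p.2)) ∘ (fun c => (c, (t.count c : Int)))))
      = (pvSP t).filter (fun c => decide (2 ≤ t.count c)) := by
    apply List.filter_congr
    intro c _
    simp only [Function.comp]
    by_cases h : 2 ≤ t.count c
    · simp [h]; omega
    · simp at h ⊢; omega
  rw [hfilter]
  apply List.map_congr_left
  intro c hc
  rw [List.mem_filter] at hc
  have h2 : 2 ≤ t.count c := by simpa using hc.2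
  have h3 := pvE_count_sub t l hnd hm c
  simp only [Function.comp]
  rw [h3]
  congr 1
  omega

theorem pvSP_rev (u : List Char) :
    PySem.List.sorted (PySem.Set.ofList u) (fun x => x) true = (pvSP u).reverse := by
  apply PySem.List.sorted_rev_eq_of_perm_of_pairwise_gt
  · exact (pvSP u).reverse_perm.trans (PySem.List.sorted_perm _ _ _)
  · rw [List.pairwise_reverse]
    exact PySem.List.sorted_ofList_pairwise_lt u

theorem pvPS_fst (s : List Char) : (pvPS s).map Prod.fst = pvSP s := by
  simp [pvPS, List.map_map, Function.comp_def]

theorem pvPS_nil (s : List Char) : pvPS s = [] ↔ s = [] := by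
  constructor
  · intro h
    rcases List.eq_nil_or_concat s with h' | ⟨u, a, rfl⟩
    · exact h'
    · exfalso
      have h1 : pvSP (u ++ [a]) = [] := by
        have := congrArg (List.map Prod.fst) h
        rw [pvPS_fst] at this
        simpa using this
      have ha : a ∈ pvSP (u ++ [a]) := (pvSP_mem _ a).mpr (by simp)
      simp [h1] at ha
  · rintro rfl
    simp [pvPS, pvSP, PySem.List.sorted_eq_nil_iff, PySem.Set.ofList]

theorem pvLoopA_step (t out : List Char) (h : t ≠ []) :
    pvLoopA t out = pvLoopA (pvE (pvE t (pvSP t)) ((pvSP (pvE t (pvSP t))).reverse))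
      ((out ++ pvSP t) ++ (pvSP (pvE t (pvSP t))).reverse) := by
  conv_lhs => rw [pvLoopA]
  simp only [h, dite_false]
  rw [pvPassA_eq, pvPassA_eq]
  unfold pvSP pvE
  rw [pvSP_rev]
  unfold pvSP
  rfl

theorem pvLoopB_step (ps : List (Char × Int)) (out : List Char) (h : ps ≠ []) :
    pvLoopB ps out = pvLoopB (pvDec (pvDec ps))
      ((out ++ ps.map Prod.fst) ++ ((pvDec ps).reverse.map Prod.fst)) := by
  conv_lhs => rw [pvLoopB]
  simp only [h, dite_false]

theorem pvLoop_eq : ∀ n (t : List Char) (out : List Char), t.length ≤ n →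
    pvLoopA t out = pvLoopB (pvPS t) out := by
  intro n
  induction n with
  | zero =>
      intro t out ht
      have h0 : t = [] := List.length_eq_zero_iff.mp (Nat.le_zero.mp ht)
      subst h0
      rw [pvLoopA, pvLoopB]
      simp [(pvPS_nil []).mpr rfl]
  | succ n ih =>
      intro t out ht
      by_cases h0 : t = []
      · subst h0
        rw [pvLoopA, pvLoopB]
        simp [(pvPS_nil []).mpr rfl]
      · have hps : pvPS t ≠ [] := fun h => h0 ((pvPS_nil t).mp h)
        rw [pvLoopA_step t out h0, pvLoopB_step _ _ hps]
        have hmem1 : ∀ c, c ∈ pvSP t ↔ c ∈ t := pvSP_mem t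
        have hPS1 : pvPS (pvE t (pvSP t)) = pvDec (pvPS t) :=
          pvPS_E t (pvSP t) (pvSP_nodup t) hmem1
        have hnd2 : ((pvSP (pvE t (pvSP t))).reverse).Nodup :=
          List.nodup_reverse.mpr (pvSP_nodup _)
        have hmem2 : ∀ c, c ∈ (pvSP (pvE t (pvSP t))).reverse ↔ c ∈ pvE t (pvSP t) := by
          intro c; rw [List.mem_reverse]; exact pvSP_mem _ c
        have hPS2 : pvPS (pvE (pvE t (pvSP t)) ((pvSP (pvE t (pvSP t))).reverse))
            = pvDec (pvPS (pvE t (pvSP t))) := pvPS_E _ _ hnd2 hmem2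
        rw [pvPS_fst, ← hPS1, List.map_reverse, pvPS_fst, ← hPS2]
        apply ih
        have hlen1 : (pvE t (pvSP t)).length < t.length := by
          have h := pvPassA_snd_lt t out h0
          rw [pvPassA_eq] at h
          exact h
        have hlen2 : (pvE (pvE t (pvSP t)) ((pvSP (pvE t (pvSP t))).reverse)).length
            ≤ (pvE t (pvSP t)).length := pvErase_len_le _ _
        omega

-- ===== VERDICT (by name: the statement is the Claim_ definition above) =====
theorem solution_909_1_spec : Claim_equal_solution_909_1 := by
  unfold Claim_equal_solution_909_1
  intro s _
  unfold Spec_solution_909_1 solution_909_1 solution_909_1_alt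
  have hcounts : (s.toList.foldl (fun d c => d.insert c (d.getD c 0 + 1)) PySem.Dict.empty)
      = PySem.Dict.counter s.toList := rfl
  simp only [hcounts, PySem.Dict.keys_counter]
  have hpairs : (PySem.List.sorted (PySem.Set.ofList s.toList) (fun x => x)).map
        (fun c => (c, (PySem.Dict.counter s.toList).getD c 0)) = pvPS s.toList := by
    unfold pvPS pvSP
    apply List.map_congr_left
    intro c _
    rw [PySem.Dict.getD_counter]
  rw [hpairs]
  exact congrArg String.ofList (pvLoop_eq s.toList.length s.toList [] le_rfl)
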